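-- pv_equiv track=rewrite | github.com/TheLogicMaster/VHDLSonic | basic.py | find_parentheses
-- ===== SOURCE A (Python) =====
-- def find_parentheses(expression):
--     groups = []
--     group_depth = 0
--     group_start = 0
--     for j in range(len(expression)):
--         if expression[j] == '(':
--             if group_depth == 0:
--                 group_start = j
--             group_depth += 1
--         elif expression[j] == ')':
--             group_depth -= 1
--             if group_depth == 0:
--                 groups.append((group_start, j))
--     return groups
-- ===== SOURCE B (Python) =====
-- def find_parentheses(expression):
--     # Table-based: precompute running depth before each char, then filter and zip.
--     before = []
--     depth = 0
--     for ch in expression: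
--         before.append(depth)
--         depth += (ch == '(') - (ch == ')')
--     starts = [i for i in range(len(expression)) if expression[i] == '(' and before[i] == 0]
--     ends = [i for i in range(len(expression)) if expression[i] == ')' and before[i] == 1]
--     return list(zip(starts, ends))
-- ===== Notes on version B (the rewrite author's own statement) =====
-- stated objective: alternative
-- what changed: Replaced A's single stateful scan (mutable depth counter plus remembered group start) by a precomputed running-depth table followed by two index-filter passes (top-level opens where depth-before==0, top-level closes where depth-before==1) zipped into pairs.
import Mathlib
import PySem

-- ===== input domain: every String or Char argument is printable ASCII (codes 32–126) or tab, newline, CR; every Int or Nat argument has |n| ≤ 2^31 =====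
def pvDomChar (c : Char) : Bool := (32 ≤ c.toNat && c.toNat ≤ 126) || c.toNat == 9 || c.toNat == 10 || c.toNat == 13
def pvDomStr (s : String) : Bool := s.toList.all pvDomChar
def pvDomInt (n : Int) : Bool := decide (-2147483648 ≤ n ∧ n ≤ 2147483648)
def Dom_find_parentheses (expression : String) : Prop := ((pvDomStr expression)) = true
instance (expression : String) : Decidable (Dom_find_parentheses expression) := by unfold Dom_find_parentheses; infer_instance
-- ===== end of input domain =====

-- B replaces A's single stateful scan (depth + remembered group start) by a precomputed
-- depth table followed by two index filters zipped together; same O(n) cost ("alternative").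

-- ===== PORT A =====
-- the for-loop over j, with state (groups, group_depth, group_start)
def pvALoop (cs : List Char) (j : Int) (groups : List (Int × Int)) (depth start : Int) :
    List (Int × Int) :=
  match cs with
  | [] => groups
  | c :: rest =>
    if c = '(' then
      pvALoop rest (j + 1) groups (depth + 1) (if depth = 0 then j else start)
    else if c = ')' then
      pvALoop rest (j + 1)
        (if depth - 1 = 0 then groups ++ [(start, j)] else groups) (depth - 1) start
    else
      pvALoop rest (j + 1) groups depth start

def find_parentheses (expression : String) : List (Int × Int) :=
  pvALoop expression.toList 0 [] 0 0

-- ===== PORT B =====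
-- depth += (ch == '(') - (ch == ')')
def pvDelta (c : Char) : Int :=
  (if c = '(' then (1 : Int) else 0) - (if c = ')' then (1 : Int) else 0)

def find_parentheses_alt (expression : String) : List (Int × Int) :=
  let cs := expression.toList
  -- before[i] = depth before character i
  let before := (cs.foldl (fun (p : List Int × Int) c => (p.1 ++ [p.2], p.2 + pvDelta c))
      (([] : List Int), (0 : Int))).1
  let starts := ((List.range cs.length).filter
      (fun i => cs.getD i ' ' == '(' && before.getD i 0 == 0)).map (fun (i : Nat) => (i : Int))
  let ends := ((List.range cs.length).filter
      (fun i => cs.getD i ' ' == ')' && before.getD i 0 == 1)).map (fun (i : Nat) => (i : Int))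
  starts.zip ends

-- ===== PRECONDITION & SPEC =====
def Spec_find_parentheses (expression : String) (out : List (Int × Int)) : Prop := out = find_parentheses_alt expression
instance (expression : String) (out : List (Int × Int)) : Decidable (Spec_find_parentheses expression out) := by unfold Spec_find_parentheses; infer_instance

-- ===== CLAIM (what is proved, stated in full; the proofs are below) =====
def Claim_equal_find_parentheses : Prop := ∀ (expression : String), Dom_find_parentheses expression → Spec_find_parentheses expression (find_parentheses expression)

-- ===== LEMMAS AND PROOFS =====

-- recursive characterisations used only by the proofs
def pvS : List Char → Int → Int → List Int
  | [], _, _ => []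
  | c :: cs, d, j => (if c = '(' ∧ d = 0 then [j] else []) ++ pvS cs (d + pvDelta c) (j + 1)

def pvE : List Char → Int → Int → List Int
  | [], _, _ => []
  | c :: cs, d, j => (if c = ')' ∧ d = 1 then [j] else []) ++ pvE cs (d + pvDelta c) (j + 1)

def pvBefore : List Char → Int → List Int
  | [], _ => []
  | c :: cs, d => d :: pvBefore cs (d + pvDelta c)

lemma pvBefore_fold (cs : List Char) : ∀ (acc : List Int) (d : Int),
    (cs.foldl (fun (p : List Int × Int) c => (p.1 ++ [p.2], p.2 + pvDelta c)) (acc, d)).1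
      = acc ++ pvBefore cs d := by
  induction cs with
  | nil => intro acc d; simp [pvBefore]
  | cons c cs ih => intro acc d; simp [List.foldl, pvBefore, ih]

lemma pvFilt_cons (p : Nat → Bool) (n : Nat) (k : Int) :
    ((List.range (n + 1)).filter p).map (fun (i : Nat) => (i : Int) + k)
      = (if p 0 then [k] else [])
        ++ ((List.range n).filter (fun i => p (i + 1))).map (fun (i : Nat) => (i : Int) + (k + 1)) := by
  rw [List.range_succ_eq_map, List.filter_cons]
  have hmap : ∀ (l : List Nat),
      (l.map Nat.succ).filter p = (l.filter (fun i => p (i + 1))).map Nat.succ := by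
    intro l
    rw [List.filter_map]
    rfl
  have htail : ((List.range n).filter (fun i => p (i + 1))).map (fun i => ((Nat.succ i : Nat) : Int) + k)
      = ((List.range n).filter (fun i => p (i + 1))).map (fun (i : Nat) => (i : Int) + (k + 1)) := by
    apply List.map_congr_left; intro i _; push_cast; ring
  by_cases h0 : p 0
  · rw [if_pos h0, if_pos h0, hmap, List.map_cons, List.map_map]
    simpa using htail
  · rw [if_neg h0, if_neg h0, hmap, List.map_map]
    simpa using htail

lemma pvS_fold (cs : List Char) : ∀ (d k : Int),
    ((List.range cs.length).filter
        (fun i => cs.getD i ' ' == '(' && (pvBefore cs d).getD i 0 == 0)).map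
      (fun (i : Nat) => (i : Int) + k) = pvS cs d k := by
  induction cs with
  | nil => intro d k; simp [pvS]
  | cons c cs ih =>
    intro d k
    rw [List.length_cons, pvFilt_cons, pvS]
    simp only [pvBefore, List.getD_cons_zero, List.getD_cons_succ]
    rw [ih]
    by_cases h : c = '(' ∧ d = 0
    · have hb : ((c == '(') && (d == (0 : Int))) = true := by simp [h.1, h.2]
      rw [hb, if_pos rfl, if_pos h]
    · have hb : ((c == '(') && (d == (0 : Int))) = false := by
        rcases not_and_or.mp h with h' | h' <;> simp [h']
      rw [hb, if_neg h]
      simp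

lemma pvE_fold (cs : List Char) : ∀ (d k : Int),
    ((List.range cs.length).filter
        (fun i => cs.getD i ' ' == ')' && (pvBefore cs d).getD i 0 == 1)).map
      (fun (i : Nat) => (i : Int) + k) = pvE cs d k := by
  induction cs with
  | nil => intro d k; simp [pvE]
  | cons c cs ih =>
    intro d k
    rw [List.length_cons, pvFilt_cons, pvE]
    simp only [pvBefore, List.getD_cons_zero, List.getD_cons_succ]
    rw [ih]
    by_cases h : c = ')' ∧ d = 1
    · have hb : ((c == ')') && (d == (1 : Int))) = true := by simp [h.1, h.2]
      rw [hb, if_pos rfl, if_pos h]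
    · have hb : ((c == ')') && (d == (1 : Int))) = false := by
        rcases not_and_or.mp h with h' | h' <;> simp [h']
      rw [hb, if_neg h]
      simp

-- the main invariant: A's loop equals the zip of top-level opens and closes,
-- with the remembered start prepended while the loop is inside a group (depth > 0)
lemma pvALoop_zip (cs : List Char) : ∀ (j : Int) (groups : List (Int × Int)) (d s : Int),
    pvALoop cs j groups d s =
      groups ++ (if 0 < d then List.zip (s :: pvS cs d j) (pvE cs d j)
                 else List.zip (pvS cs d j) (pvE cs d j)) := by
  induction cs with
  | nil =>
    intro j groups d s
    by_cases h : 0 < d <;> simp [pvALoop, pvS, pvE, h]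
  | cons c cs ih =>
    intro j groups d s
    by_cases hc1 : c = '('
    · subst hc1
      rw [pvALoop, if_pos rfl, ih]
      have hdm : d + pvDelta '(' = d + 1 := by
        rw [show pvDelta '(' = 1 from by decide]
      have hS : pvS ('(' :: cs) d j
          = (if d = 0 then [j] else []) ++ pvS cs (d + 1) (j + 1) := by
        rw [pvS, hdm]
        by_cases h0 : d = 0
        · rw [if_pos (by exact ⟨rfl, h0⟩), if_pos h0]
        · rw [if_neg (by simp [h0]), if_neg h0]
      have hE : pvE ('(' :: cs) d j = pvE cs (d + 1) (j + 1) := by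
        rw [pvE, hdm, if_neg (by simp), List.nil_append]
      rw [hS, hE]
      by_cases h0 : d = 0
      · subst h0
        rw [if_pos rfl, if_neg (by omega : ¬ (0:Int) < 0),
          if_pos (by omega : (0:Int) < 0 + 1)]
        simp
      · simp only [if_neg h0, List.nil_append]
        by_cases hp : 0 < d
        · rw [if_pos hp, if_pos (by omega : 0 < d + 1)]
        · rw [if_neg hp, if_neg (by omega : ¬ 0 < d + 1)]
    · by_cases hc2 : c = ')'
      · subst hc2
        rw [pvALoop, if_neg hc1, if_pos rfl, ih]
        have hdm : d + pvDelta ')' = d - 1 := by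
          rw [show pvDelta ')' = -1 from by decide]; ring
        have hS : pvS (')' :: cs) d j = pvS cs (d - 1) (j + 1) := by
          rw [pvS, hdm, if_neg (by simp), List.nil_append]
        have hE : pvE (')' :: cs) d j
            = (if d = 1 then [j] else []) ++ pvE cs (d - 1) (j + 1) := by
          rw [pvE, hdm]
          by_cases h1 : d = 1
          · rw [if_pos (by exact ⟨rfl, h1⟩), if_pos h1]
          · rw [if_neg (by simp [h1]), if_neg h1]
        rw [hS, hE]
        by_cases h1 : d = 1
        · subst h1
          rw [if_pos (by omega : (1:Int) - 1 = 0), if_pos rfl,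
            if_pos (by omega : (0:Int) < 1), if_neg (by omega : ¬ (0:Int) < 1 - 1)]
          simp [List.zip_cons_cons]
        · rw [if_neg h1, List.nil_append, if_neg (by omega : ¬ d - 1 = 0)]
          by_cases hp : 0 < d
          · rw [if_pos hp, if_pos (by omega : 0 < d - 1)]
          · rw [if_neg hp, if_neg (by omega : ¬ 0 < d - 1)]
      · rw [pvALoop, if_neg hc1, if_neg hc2, ih]
        have hd0 : d + pvDelta c = d := by simp [pvDelta, hc1, hc2]
        have hS : pvS (c :: cs) d j = pvS cs d (j + 1) := by
          rw [pvS, hd0, if_neg (by simp [hc1]), List.nil_append]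
        have hE : pvE (c :: cs) d j = pvE cs d (j + 1) := by
          rw [pvE, hd0, if_neg (by simp [hc2]), List.nil_append]
        rw [hS, hE]

-- ===== VERDICT (by name: the statement is the Claim_ definition above) =====
theorem find_parentheses_spec : Claim_equal_find_parentheses := by
  intro expression _
  unfold Spec_find_parentheses
  simp only [find_parentheses, find_parentheses_alt]
  rw [pvALoop_zip, if_neg (by omega : ¬ (0:Int) < 0), List.nil_append, pvBefore_fold,
    List.nil_append]
  rw [show (fun (i : Nat) => (i : Int)) = (fun (i : Nat) => (i : Int) + 0) from by
    funext i; ring]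
  rw [pvS_fold, pvE_fold]
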